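-- pv_equiv track=rewrite | github.com/ydb-platform/ydb | contrib/python/aiokafka/aiokafka/coordinator/assignors/sticky/partition_movements.py | _is_subcycle
-- ===== SOURCE A (Python) =====
-- from collections.abc import Sequence
-- from copy import deepcopy
-- from typing import Any, NamedTuple
--
-- def is_sublist(source: Sequence[Any], target: Sequence[Any]) -> bool:
--     """Checks if one list is a sublist of another.
--
--     Arguments:
--       source: the list in which to search for the occurrence of target.
--       target: the list to search for as a sublist of source
--
--     Returns:
--       true if target is in source; false otherwise
--     """
--     for index in (i for i, e in enumerate(source) if e == target[0]):
--         if tuple(source[index : index + len(target)]) == target: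
--             return True
--     return False
--
-- def _is_subcycle(cycle: list[str], cycles: set[tuple[str, ...]]) -> bool:
--     super_cycle = deepcopy(cycle)
--     super_cycle = super_cycle[:-1]
--     super_cycle.extend(cycle)
--     for found_cycle in cycles:
--         if len(found_cycle) == len(cycle) and is_sublist(super_cycle, found_cycle):
--             return True
--     return False
-- ===== SOURCE B (Python) =====
-- def _is_subcycle(cycle, cycles):
--     n = len(cycle)
--     super_cycle = cycle[:-1] + cycle
--     windows = {tuple(super_cycle[i:i + n]) for i in range(n)}
--     return any(found_cycle in windows for found_cycle in cycles)
-- ===== Notes on version B (the rewrite author's own statement) =====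
-- stated objective: faster
-- what changed: B precomputes the set of all length-n windows of cycle[:-1]+cycle once and tests each found_cycle by hash-set membership, eliminating the deepcopy and the per-candidate is_sublist scan.
import Mathlib
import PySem

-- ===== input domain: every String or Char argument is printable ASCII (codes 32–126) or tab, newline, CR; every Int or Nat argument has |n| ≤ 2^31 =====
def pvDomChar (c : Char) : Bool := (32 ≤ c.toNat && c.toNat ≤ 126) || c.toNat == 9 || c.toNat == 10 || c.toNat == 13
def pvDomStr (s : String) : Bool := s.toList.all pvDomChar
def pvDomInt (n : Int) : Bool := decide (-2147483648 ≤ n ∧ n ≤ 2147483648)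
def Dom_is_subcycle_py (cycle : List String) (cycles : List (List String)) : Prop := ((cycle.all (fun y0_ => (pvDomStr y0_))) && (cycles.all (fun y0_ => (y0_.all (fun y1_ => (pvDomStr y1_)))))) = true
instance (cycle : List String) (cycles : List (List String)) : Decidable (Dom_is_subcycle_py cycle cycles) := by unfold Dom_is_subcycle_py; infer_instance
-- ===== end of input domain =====

-- B replaces the per-candidate sublist scan of A by a precomputed set of all length-n
-- windows of cycle[:-1]+cycle and a set-membership test per candidate (removes the inner sublist scan).
-- ===== PORT A =====
def is_sublist (source : List String) (target : List String) : Bool :=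
  (PySem.List.enumerate source 0).any (fun ie =>
    (PySem.List.pyGet? target 0 == some ie.2) &&
    (PySem.List.slice source (some ie.1) (some (ie.1 + (target.length : Int))) == target))

def is_subcycle_py (cycle : List String) (cycles : List (List String)) : Bool :=
  let super_cycle := cycle
  let super_cycle := PySem.List.slice super_cycle none (some (-1))
  let super_cycle := super_cycle ++ cycle
  cycles.any (fun found_cycle =>
    (found_cycle.length == cycle.length) && is_sublist super_cycle found_cycle)

-- ===== PORT B =====
def is_subcycle_py_alt (cycle : List String) (cycles : List (List String)) : Bool :=
  let n := cycle.length
  let super_cycle := PySem.List.slice cycle none (some (-1)) ++ cycle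
  let windows : PySem.Set (List String) :=
    PySem.Set.ofList ((PySem.List.pyRange 0 (n : Int) 1).map
      (fun i => PySem.List.slice super_cycle (some i) (some (i + (n : Int)))))
  cycles.any (fun found_cycle => windows.contains found_cycle)

-- ===== PRECONDITION & SPEC =====
def Spec_is_subcycle_py (cycle : List String) (cycles : List (List String)) (out : Bool) : Prop := out = is_subcycle_py_alt cycle cycles
instance (cycle : List String) (cycles : List (List String)) (out : Bool) : Decidable (Spec_is_subcycle_py cycle cycles out) := by unfold Spec_is_subcycle_py; infer_instance

-- ===== CLAIM (what is proved, stated in full; the proofs are below) =====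
def Claim_equal_is_subcycle_py : Prop := ∀ (cycle : List String) (cycles : List (List String)), Dom_is_subcycle_py cycle cycles → Spec_is_subcycle_py cycle cycles (is_subcycle_py cycle cycles)

-- ===== LEMMAS AND PROOFS =====
lemma key_window (cycle found : List String) :
    ((found.length == cycle.length) && is_sublist (cycle.dropLast ++ cycle) found)
    = PySem.Set.contains
        (PySem.Set.ofList ((PySem.List.pyRange 0 (cycle.length : Int) 1).map
          (fun i => PySem.List.slice (cycle.dropLast ++ cycle) (some i)
            (some (i + (cycle.length : Int)))))) found := by
  unfold is_sublist
  set super := cycle.dropLast ++ cycle with hsuper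
  have hsl : super.length = cycle.length - 1 + cycle.length := by
    simp [hsuper, List.length_dropLast]
  rw [Bool.eq_iff_iff]
  simp only [Bool.and_eq_true, beq_iff_eq, List.any_eq_true, PySem.Set.contains_iff,
    PySem.Set.mem_ofList, List.mem_map, PySem.List.mem_pyRange_one,
    PySem.List.mem_enumerate_iff]
  constructor
  · rintro ⟨hlen, x, ⟨k, hk, rfl⟩, _, hslice⟩
    simp only [zero_add, hlen] at hslice
    rw [PySem.List.slice_natCast_add] at hslice
    have hmin : found.length = min cycle.length (super.length - k) := by
      rw [← hslice]; simp
    have hn1 : 1 ≤ cycle.length := by omega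
    have hkn : k < cycle.length := by omega
    refine ⟨(k : Int), ⟨by positivity, by exact_mod_cast hkn⟩, ?_⟩
    rw [PySem.List.slice_natCast_add]
    exact hslice
  · rintro ⟨a, ⟨ha0, han⟩, hslice⟩
    lift a to ℕ using ha0 with k
    have hkn : k < cycle.length := by exact_mod_cast han
    have hn1 : 1 ≤ cycle.length := by omega
    rw [PySem.List.slice_natCast_add] at hslice
    have hfl : found.length = cycle.length := by
      rw [← hslice]; simp; omega
    have hks : k < super.length := by omega
    refine ⟨hfl, (0 + (k:Int), super[k]), ⟨k, hks, rfl⟩, ?_, ?_⟩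
    · have h0 : found[0]? = some super[k] := by
        rw [← hslice]
        rw [List.getElem?_take_of_lt (by omega), List.getElem?_drop,
          List.getElem?_eq_getElem (by omega)]
        simp
      have hpos : 0 < found.length := by omega
      simpa [PySem.List.pyGet?, PySem.List.pyIdx?, hpos] using h0
    · simp only [zero_add, hfl]
      rw [PySem.List.slice_natCast_add]
      exact hslice


-- ===== VERDICT (by name: the statement is the Claim_ definition above) =====
theorem is_subcycle_py_spec : Claim_equal_is_subcycle_py := by
  intro cycle cycles _
  unfold Spec_is_subcycle_py is_subcycle_py is_subcycle_py_alt
  simp only [PySem.List.slice_to_neg_one]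
  congr 1
  funext found
  exact key_window cycle found
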